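-- pv_equiv track=rewrite | github.com/rahulgowdaa/ATS-Checker | model.py | weight_keywords
-- ===== SOURCE A (Python) =====
-- from collections import Counter, defaultdict
--
-- def weight_keywords(keywords, critical_terms):
--     weighted_keywords = Counter()
--     for keyword, count in keywords.items():
--         # Increase weight for critical terms identified
--         if keyword in critical_terms:
--             # Adjust multiplier based on importance
--             weighted_keywords[keyword] = count * 3
--         else:
--             weighted_keywords[keyword] = count
--     return weighted_keywords
-- ===== SOURCE B (Python) =====
-- from collections import Counter
--
-- def weight_keywords(keywords, critical_terms):
--     # Copy all counts unchanged, then triple the critical ones in place.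
--     weighted = Counter(keywords)
--     for term in set(critical_terms):
--         if term in weighted:
--             weighted[term] *= 3
--     return weighted
-- ===== Notes on version B (the rewrite author's own statement) =====
-- stated objective: alternative
-- what changed: Replaces A's single loop that membership-tests every keyword against the critical_terms list with a copy-then-adjust two-pass: copy all counts, then iterate the deduplicated critical terms and triple matching entries in place.
import Mathlib
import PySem

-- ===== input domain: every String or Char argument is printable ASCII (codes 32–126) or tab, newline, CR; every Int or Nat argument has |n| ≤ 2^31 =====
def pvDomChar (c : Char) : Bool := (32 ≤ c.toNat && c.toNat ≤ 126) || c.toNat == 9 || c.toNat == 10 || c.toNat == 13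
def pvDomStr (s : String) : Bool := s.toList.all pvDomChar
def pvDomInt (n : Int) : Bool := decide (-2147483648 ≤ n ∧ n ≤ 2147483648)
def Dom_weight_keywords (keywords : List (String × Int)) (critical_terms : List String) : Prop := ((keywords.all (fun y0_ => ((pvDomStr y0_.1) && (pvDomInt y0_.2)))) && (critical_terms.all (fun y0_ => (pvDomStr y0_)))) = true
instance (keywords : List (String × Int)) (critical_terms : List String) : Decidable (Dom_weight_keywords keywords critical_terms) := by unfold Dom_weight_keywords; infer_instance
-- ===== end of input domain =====

-- Equivalence of A's one-pass membership-testing loop with B's copy-then-adjust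
-- two-pass structure (same return value; B is an alternative decomposition).


-- ===== PORT A =====
def weight_keywords (keywords : List (String × Int)) (critical_terms : List String) : List (String × Int) :=
  (keywords.foldl
    (fun d p =>
      if critical_terms.contains p.1 then d.insert p.1 (p.2 * 3) else d.insert p.1 p.2)
    (PySem.Dict.empty : PySem.Dict String Int)).items

-- ===== PORT B =====
def weight_keywords_alt (keywords : List (String × Int)) (critical_terms : List String) : List (String × Int) :=
  -- weighted = Counter(keywords); then: for term in set(critical_terms): if term in weighted: weighted[term] *= 3
  ((PySem.Set.ofList critical_terms).foldl
    (fun d t => if d.contains t then d.insert t (d.getD t 0 * 3) else d)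
    (keywords.foldl (fun d p => d.insert p.1 p.2) (PySem.Dict.empty : PySem.Dict String Int))).items

-- ===== PRECONDITION & SPEC =====
def Spec_weight_keywords (keywords : List (String × Int)) (critical_terms : List String) (out : List (String × Int)) : Prop := out = weight_keywords_alt keywords critical_terms
instance (keywords : List (String × Int)) (critical_terms : List String) (out : List (String × Int)) : Decidable (Spec_weight_keywords keywords critical_terms out) := by unfold Spec_weight_keywords; infer_instance

-- ===== CLAIM (what is proved, stated in full; the proofs are below) =====
def Claim_equal_weight_keywords : Prop := ∀ (keywords : List (String × Int)) (critical_terms : List String), Dom_weight_keywords keywords critical_terms → Spec_weight_keywords keywords critical_terms (weight_keywords keywords critical_terms)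

-- ===== LEMMAS AND PROOFS =====

-- value transform A applies to each entry (key-dependent only)
def wFun (crit : List String) (p : String × Int) : String × Int :=
  (p.1, if crit.contains p.1 then p.2 * 3 else p.2)

def mapW (crit : List String) (d : PySem.Dict String Int) : PySem.Dict String Int :=
  PySem.Dict.mk (d.items.map (wFun crit))

lemma items_mapW (crit : List String) (d : PySem.Dict String Int) :
    (mapW crit d).items = d.items.map (wFun crit) := rfl

lemma contains_mapW (crit : List String) (d : PySem.Dict String Int) (k : String) :
    (mapW crit d).contains k = d.contains k := by
  have hkeys : (mapW crit d).keys = d.keys := by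
    simp [mapW, PySem.Dict.keys, List.map_map, wFun, Function.comp]
  rw [PySem.Dict.contains_eq_decide_mem_keys, PySem.Dict.contains_eq_decide_mem_keys, hkeys]

lemma insert_mapW (crit : List String) (d : PySem.Dict String Int) (k : String) (v : Int) :
    (mapW crit d).insert k (if crit.contains k then v * 3 else v) = mapW crit (d.insert k v) := by
  apply PySem.Dict.ext
  by_cases h : d.contains k = true
  · rw [PySem.Dict.items_insert_of_contains _ _ ((contains_mapW crit d k).trans h)]
    rw [items_mapW, items_mapW, PySem.Dict.items_insert_of_contains _ _ h]
    simp only [List.map_map]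
    apply List.map_congr_left
    intro p _
    by_cases hp : p.1 = k
    · simp [Function.comp, wFun, hp]
    · simp [Function.comp, wFun, hp]
  · have h' : d.contains k = false := by simpa using h
    rw [PySem.Dict.items_insert_of_not_contains _ _ (by rw [contains_mapW]; exact h')]
    rw [items_mapW, items_mapW, PySem.Dict.items_insert_of_not_contains _ _ h']
    simp [wFun]

lemma foldA_eq (crit : List String) (xs : List (String × Int)) (d : PySem.Dict String Int) :
    xs.foldl
      (fun d p => if crit.contains p.1 then d.insert p.1 (p.2 * 3) else d.insert p.1 p.2)
      (mapW crit d)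
    = mapW crit (xs.foldl (fun d p => d.insert p.1 p.2) d) := by
  induction xs generalizing d with
  | nil => rfl
  | cons p xs ih =>
    simp only [List.foldl_cons]
    have hstep : (if crit.contains p.1 then (mapW crit d).insert p.1 (p.2 * 3)
                    else (mapW crit d).insert p.1 p.2)
        = (mapW crit d).insert p.1 (if crit.contains p.1 then p.2 * 3 else p.2) := by
      by_cases h : crit.contains p.1 = true
      · rw [if_pos h, if_pos h]
      · rw [if_neg h, if_neg h]
    rw [hstep, insert_mapW]
    exact ih (d.insert p.1 p.2)

def selFun (S : List String) (p : String × Int) : String × Int :=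
  if p.1 ∈ S then (p.1, p.2 * 3) else p

lemma foldB_eq (S : List String) (d : PySem.Dict String Int)
    (hS : S.Nodup) (hd : d.keys.Nodup) :
    S.foldl (fun d t => if d.contains t then d.insert t (d.getD t 0 * 3) else d) d
    = PySem.Dict.mk (d.items.map (selFun S)) := by
  induction S generalizing d with
  | nil =>
    apply PySem.Dict.ext
    have hc : ∀ p ∈ d.items, p = selFun ([] : List String) p := by
      intro p _; simp [selFun]
    calc (List.foldl _ d []).items = d.items.map id := by simp
      _ = d.items.map (selFun []) := List.map_congr_left (by intro p hp; simpa using (hc p hp))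
      _ = (PySem.Dict.mk (d.items.map (selFun []))).items := rfl
  | cons t S ih =>
    have htS : t ∉ S := (List.nodup_cons.mp hS).1
    have hS' : S.Nodup := (List.nodup_cons.mp hS).2
    simp only [List.foldl_cons]
    by_cases h : d.contains t = true
    · rw [if_pos h]
      rw [ih (d.insert t (d.getD t 0 * 3)) hS' (PySem.Dict.nodup_keys_insert _ _ _ hd)]
      apply PySem.Dict.ext
      show ((d.insert t (d.getD t 0 * 3)).items.map (selFun S))
          = d.items.map (selFun (t :: S))
      rw [PySem.Dict.items_insert_of_contains _ _ h, List.map_map]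
      apply List.map_congr_left
      intro p hp
      by_cases hpk : p.1 = t
      · have hmem : (t, p.2) ∈ d.items := by rw [← hpk]; exact hp
        have hget : d.getD t 0 = p.2 := PySem.Dict.getD_of_mem_items _ hmem hd 0
        simp [Function.comp, selFun, hpk, hget, htS]
      · simp [Function.comp, selFun, hpk]
    · rw [if_neg h]
      rw [ih d hS' hd]
      apply PySem.Dict.ext
      show d.items.map (selFun S) = d.items.map (selFun (t :: S))
      apply List.map_congr_left
      intro p hp
      have hpk : p.1 ≠ t := by
        intro he
        have hc : d.contains p.1 = true :=
          (PySem.Dict.contains_iff_mem_keys _ _).mpr (PySem.Dict.mem_keys_of_mem_items _ hp)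
        exact h (he ▸ hc)
      have : (p.1 ∈ t :: S) ↔ (p.1 ∈ S) := by simp [hpk]
      simp [selFun, this]

lemma base_nodup (keywords : List (String × Int)) :
    (keywords.foldl (fun d p => d.insert p.1 p.2) (PySem.Dict.empty : PySem.Dict String Int)).keys.Nodup :=
  PySem.Dict.nodup_keys_foldl_insert_key keywords Prod.fst (fun _ p => p.2) _
    PySem.Dict.nodup_keys_empty

-- ===== VERDICT (by name: the statement is the Claim_ definition above) =====
theorem weight_keywords_spec : Claim_equal_weight_keywords := by
  intro keywords critical_terms _
  unfold Spec_weight_keywords weight_keywords weight_keywords_alt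
  have hA := foldA_eq critical_terms keywords PySem.Dict.empty
  have hmapW_empty : mapW critical_terms PySem.Dict.empty = PySem.Dict.empty := rfl
  rw [hmapW_empty] at hA
  rw [hA, foldB_eq (PySem.Set.ofList critical_terms) _ (PySem.Set.nodup_ofList critical_terms)
      (base_nodup keywords)]
  rw [items_mapW]
  show _ = ((keywords.foldl (fun d p => d.insert p.1 p.2)
      (PySem.Dict.empty : PySem.Dict String Int)).items.map (selFun (PySem.Set.ofList critical_terms)))
  apply List.map_congr_left
  intro p _
  have hmem : (p.1 ∈ PySem.Set.ofList critical_terms) ↔ p.1 ∈ critical_terms :=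
    PySem.Set.mem_ofList critical_terms p.1
  by_cases h : p.1 ∈ critical_terms
  · simp [wFun, selFun, hmem, h]
  · simp [wFun, selFun, hmem, h]
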